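-- pv_equiv track=rewrite | github.com/nhuray/mongo-replication | src/mongo_replication/engine/pii/presidio_anonymizer.py | _redact_phone
-- ===== SOURCE A (Python) =====
-- def _redact_phone(phone: str) -> str:
--     """Redact phone preserving format and last 4 digits"""
--     # Count digits
--     digits = [c for c in phone if c.isdigit()]
--     if len(digits) < 4:
--         # Too few digits, mask all
--         return "***"
--
--     # Keep last 4 digits, mask the rest
--     result = ""
--     digits_seen = 0
--     total_digits = len(digits)
--
--     for char in phone:
--         if char.isdigit():
--             if digits_seen < total_digits - 4:
--                 result += "*"
--             else:
--                 result += char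
--             digits_seen += 1
--         else:
--             result += char
--
--     return result
-- ===== SOURCE B (Python) =====
-- def _redact_phone(phone: str) -> str:
--     """Redact phone preserving format and last 4 digits (single right-to-left pass)."""
--     out = []
--     kept = 0
--     total = 0
--     for char in reversed(phone):
--         if char.isdigit():
--             total += 1
--             if kept < 4:
--                 out.append(char)
--                 kept += 1
--             else:
--                 out.append("*")
--         else:
--             out.append(char)
--     if total < 4:
--         return "***"
--     out.reverse()
--     return "".join(out)
-- ===== Notes on version B (the rewrite author's own statement) =====
-- stated objective: alternative
-- what changed: Replaced A's two-pass strategy (pre-count digits, then forward scan masking while digits_seen < total-4) by a single right-to-left pass that keeps the first four digits it meets, masking the rest, counting digits as it goes, and reversing the output at the end.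
import Mathlib
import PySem

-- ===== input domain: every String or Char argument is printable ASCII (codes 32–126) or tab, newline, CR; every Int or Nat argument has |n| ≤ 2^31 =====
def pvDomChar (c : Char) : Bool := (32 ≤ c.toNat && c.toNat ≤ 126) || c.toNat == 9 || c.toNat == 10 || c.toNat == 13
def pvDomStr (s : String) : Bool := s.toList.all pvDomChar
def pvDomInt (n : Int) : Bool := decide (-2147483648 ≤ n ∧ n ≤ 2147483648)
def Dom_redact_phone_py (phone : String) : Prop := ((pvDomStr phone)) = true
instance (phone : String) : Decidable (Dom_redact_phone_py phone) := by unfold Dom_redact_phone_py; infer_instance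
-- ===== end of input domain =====

-- B replaces A's two-pass count-then-forward-mask with one right-to-left pass keeping the
-- first four digits met; same result, similar cost (objective: alternative decomposition).

-- ===== PORT A =====
-- the forward loop of A: state = (digits_seen, total_digits fixed, result so far)
def pvLoopA : List Char → Nat → Nat → List Char → List Char
  | [], _, _, acc => acc
  | c :: t, seen, total, acc =>
    if PySem.Chars.isdigit c then
      if seen < total - 4 then pvLoopA t (seen + 1) total (acc ++ ['*'])
      else pvLoopA t (seen + 1) total (acc ++ [c])
    else pvLoopA t seen total (acc ++ [c])

def redact_phone_py (phone : String) : String :=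
  let digits := phone.toList.filter (fun c => PySem.Chars.isdigit c)
  if digits.length < 4 then "***"
  else String.mk (pvLoopA phone.toList 0 digits.length [])

-- ===== PORT B =====
-- B's single loop over reversed(phone): state = (kept, total, out so far); out is reversed at the end
def pvLoopB : List Char → Nat → Nat → List Char → Nat × Nat × List Char
  | [], kept, total, out => (kept, total, out)
  | c :: t, kept, total, out =>
    if PySem.Chars.isdigit c then
      if kept < 4 then pvLoopB t (kept + 1) (total + 1) (out ++ [c])
      else pvLoopB t kept (total + 1) (out ++ ['*'])
    else pvLoopB t kept total (out ++ [c])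

def redact_phone_py_alt (phone : String) : String :=
  let r := pvLoopB phone.toList.reverse 0 0 []
  if r.2.1 < 4 then "***" else String.mk r.2.2.reverse

-- ===== PRECONDITION & SPEC =====
def Spec_redact_phone_py (phone : String) (out : String) : Prop := out = redact_phone_py_alt phone
instance (phone : String) (out : String) : Decidable (Spec_redact_phone_py phone out) := by unfold Spec_redact_phone_py; infer_instance

-- ===== CLAIM (what is proved, stated in full; the proofs are below) =====
def Claim_equal_redact_phone_py : Prop := ∀ (phone : String), Dom_redact_phone_py phone → Spec_redact_phone_py phone (redact_phone_py phone)

-- ===== LEMMAS AND PROOFS =====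

-- number of digits in a char list
def pvDC (l : List Char) : Nat := (l.filter (fun c => PySem.Chars.isdigit c)).length

-- reference output: a digit is kept iff fewer than 4 digits lie strictly to its right
def pvOut : List Char → List Char
  | [] => []
  | c :: t =>
    (if PySem.Chars.isdigit c then (if pvDC t < 4 then c else '*') else c) :: pvOut t

theorem pvDC_cons_digit {c : Char} (t : List Char) (h : PySem.Chars.isdigit c = true) :
    pvDC (c :: t) = pvDC t + 1 := by
  simp [pvDC, List.filter, h, Nat.add_comm]

theorem pvDC_cons_nondigit {c : Char} (t : List Char) (h : PySem.Chars.isdigit c = false) :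
    pvDC (c :: t) = pvDC t := by
  simp [pvDC, List.filter, h]

theorem pvLoopA_eq (l : List Char) : ∀ (s n : Nat) (acc : List Char),
    n = s + pvDC l → pvLoopA l s n acc = acc ++ pvOut l := by
  induction l with
  | nil => intro s n acc _; simp [pvLoopA, pvOut]
  | cons c t ih =>
    intro s n acc hn
    cases hd : PySem.Chars.isdigit c with
    | true =>
      have hdc := pvDC_cons_digit t hd
      rw [hdc] at hn
      by_cases hlt : pvDC t < 4
      · have hns : ¬ s < n - 4 := by omega
        simp only [pvLoopA, hd, if_pos rfl, if_neg hns, pvOut, hd, if_pos hlt]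
        rw [ih (s + 1) n _ (by omega)]
        simp
      · have hns : s < n - 4 := by omega
        simp only [pvLoopA, hd, if_pos rfl, if_pos hns, pvOut, hd, if_neg hlt]
        rw [ih (s + 1) n _ (by omega)]
        simp
    | false =>
      have hdc := pvDC_cons_nondigit t hd
      rw [hdc] at hn
      simp only [pvLoopA, hd, Bool.false_eq_true, if_false, pvOut]
      rw [ih s n _ (by omega)]
      simp [hd]

theorem pvLoopB_append (m1 : List Char) : ∀ (m2 : List Char) (k t : Nat) (out : List Char),
    pvLoopB (m1 ++ m2) k t out =
      pvLoopB m2 (pvLoopB m1 k t out).1 (pvLoopB m1 k t out).2.1 (pvLoopB m1 k t out).2.2 := by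
  induction m1 with
  | nil => intro m2 k t out; simp [pvLoopB]
  | cons c t1 ih =>
    intro m2 k t out
    by_cases hd : PySem.Chars.isdigit c = true
    · by_cases hk : k < 4
      · simp [pvLoopB, hd, hk, ih]
      · simp [pvLoopB, hd, hk, ih]
    · simp [pvLoopB, hd, ih]

theorem pvLoopB_rev (l : List Char) : ∀ (t0 : Nat) (out : List Char),
    pvLoopB l.reverse 0 t0 out = (min (pvDC l) 4, t0 + pvDC l, out ++ (pvOut l).reverse) := by
  induction l with
  | nil => intro t0 out; simp [pvLoopB, pvDC, pvOut]
  | cons c t ih =>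
    intro t0 out
    have : (c :: t).reverse = t.reverse ++ [c] := by simp
    rw [this, pvLoopB_append, ih t0 out]
    cases hd : PySem.Chars.isdigit c with
    | true =>
      rw [pvDC_cons_digit t hd]
      by_cases hlt : pvDC t < 4
      · have hk : min (pvDC t) 4 < 4 := by omega
        simp [pvLoopB, hd, hk, hlt, pvOut]
        omega
      · have hk : ¬ min (pvDC t) 4 < 4 := by omega
        simp [pvLoopB, hd, hk, hlt, pvOut]
        omega
    | false =>
      rw [pvDC_cons_nondigit t hd]
      simp only [pvLoopB, hd, Bool.false_eq_true, if_false, pvOut]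
      simp [hd]

-- ===== VERDICT (by name: the statement is the Claim_ definition above) =====
theorem redact_phone_py_spec : Claim_equal_redact_phone_py := by
  intro phone _
  unfold Spec_redact_phone_py redact_phone_py redact_phone_py_alt
  rw [pvLoopB_rev phone.toList 0 []]
  simp only [Nat.zero_add, List.nil_append, List.reverse_reverse]
  by_cases h : pvDC phone.toList < 4
  · have hA : (phone.toList.filter (fun c => PySem.Chars.isdigit c)).length < 4 := h
    rw [if_pos hA, if_pos h]
  · have hA : ¬ (phone.toList.filter (fun c => PySem.Chars.isdigit c)).length < 4 := h
    rw [if_neg hA, if_neg h]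
    rw [pvLoopA_eq phone.toList 0 _ [] (by simp [pvDC])]
    simp
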